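-- pv_equiv track=rewrite | github.com/EhsanLS/First-Blog | blog/views.py | persian_numbers_converter
-- ===== SOURCE A (Python) =====
-- def persian_numbers_converter(x):
--     result = ''
--     numbers = {
--         '0': '\u06f0',
--         '1': '\u06f1',
--         '2': '\u06f2',
--         '3': '\u06f3',
--         '4': '\u06f4',
--         '5': '\u06f5',
--         '6': '\u06f6',
--         '7': '\u06f7',
--         '8': '\u06f8',
--         '9': '\u06f9'
--     }
--     for i in numbers.keys():
--         if i == x:
--             result = numbers.get(i)
--     return result
-- ===== SOURCE B (Python) =====
-- def persian_numbers_converter(x):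
--     # Closed-form codepoint offset instead of a dict scan.
--     if isinstance(x, str) and len(x) == 1 and '0' <= x <= '9':
--         return chr(0x06F0 + ord(x) - ord('0'))
--     return ''
-- ===== Notes on version B (the rewrite author's own statement) =====
-- stated objective: idiomatic
-- what changed: Replaces the ten-entry dict and the loop over its keys by a single length-and-range guard plus a codepoint-offset computation between the ASCII and Persian digit blocks.
import Mathlib
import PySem

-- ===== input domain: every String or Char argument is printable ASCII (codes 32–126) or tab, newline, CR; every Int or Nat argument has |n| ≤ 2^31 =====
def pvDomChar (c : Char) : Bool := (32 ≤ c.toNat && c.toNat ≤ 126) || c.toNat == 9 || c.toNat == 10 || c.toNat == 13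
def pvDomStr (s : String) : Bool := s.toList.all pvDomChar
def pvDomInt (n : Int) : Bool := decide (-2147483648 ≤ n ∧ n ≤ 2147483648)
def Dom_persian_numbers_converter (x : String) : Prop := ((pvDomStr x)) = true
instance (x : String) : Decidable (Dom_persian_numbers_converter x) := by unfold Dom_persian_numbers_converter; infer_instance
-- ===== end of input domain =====

-- B replaces A's ten-entry dict and key-scan loop by a single guarded codepoint-offset
-- computation (idiomatic; same value on every string input).

-- ===== PORT A =====
def persian_numbers_converter (x : String) : String :=
  let numbers : PySem.Dict String String :=
    PySem.Dict.ofList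
      [("0", "۰"), ("1", "۱"), ("2", "۲"), ("3", "۳"), ("4", "۴"),
       ("5", "۵"), ("6", "۶"), ("7", "۷"), ("8", "۸"), ("9", "۹")]
  (PySem.Dict.keys numbers).foldl
    (fun result i => if i == x then (numbers.get? i).getD "" else result) ""

-- ===== PORT B =====
def persian_numbers_converter_alt (x : String) : String :=
  match x.toList with
  | [c] =>
      if '0' ≤ c ∧ c ≤ '9' then
        String.ofList [Char.ofNat (0x06F0 + (c.toNat - '0'.toNat))]
      else ""
  | _ => ""

-- ===== PRECONDITION & SPEC =====
def Spec_persian_numbers_converter (x : String) (out : String) : Prop := out = persian_numbers_converter_alt x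
instance (x : String) (out : String) : Decidable (Spec_persian_numbers_converter x out) := by unfold Spec_persian_numbers_converter; infer_instance

-- ===== CLAIM (what is proved, stated in full; the proofs are below) =====
def Claim_equal_persian_numbers_converter : Prop := ∀ (x : String), Dom_persian_numbers_converter x → Spec_persian_numbers_converter x (persian_numbers_converter x)

-- ===== LEMMAS AND PROOFS =====

theorem pv_str_eq_iff (s : String) (l : List Char) :
    (s = String.ofList l) ↔ s.toList = l := by
  constructor
  · intro h; subst h; simp
  · intro h
    have := congrArg String.ofList h
    simpa using this

theorem pv_char_eq_of_toNat (c d : Char) (h : c.toNat = d.toNat) : c = d :=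
  Char.ext (UInt32.toNat_inj.mp h)

theorem pv_le_iff_toNat (a c : Char) : (a ≤ c) ↔ a.toNat ≤ c.toNat := by
  rw [Char.le_def, UInt32.le_iff_toNat_le]; rfl

theorem pvA_keys_eval :
    (List.map (fun p : String × String => p.1)
      ((PySem.Dict.empty.update
        [("0", "۰"), ("1", "۱"), ("2", "۲"), ("3", "۳"), ("4", "۴"),
         ("5", "۵"), ("6", "۶"), ("7", "۷"), ("8", "۸"), ("9", "۹")] :
        PySem.Dict String String).items)) =
    ["0", "1", "2", "3", "4", "5", "6", "7", "8", "9"] := rfl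

-- A returns '' whenever the input is not a single ASCII-digit string.
theorem pvA_empty (x : String)
    (h : ∀ c : Char, 48 ≤ c.toNat → c.toNat ≤ 57 → x.toList ≠ [c]) :
    persian_numbers_converter x = "" := by
  have hne : ∀ (s : String) (c : Char), s.toList = [c] →
      48 ≤ c.toNat → c.toNat ≤ 57 → (s == x) = false := by
    intro s c hs h1 h2
    rw [beq_eq_false_iff_ne]
    intro e
    exact h c h1 h2 (by rw [← e, hs])
  simp only [persian_numbers_converter, PySem.Dict.ofList, PySem.Dict.keys]
  rw [pvA_keys_eval]
  simp only [List.foldl]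
  rw [hne "0" '0' rfl (by decide) (by decide), hne "1" '1' rfl (by decide) (by decide),
      hne "2" '2' rfl (by decide) (by decide), hne "3" '3' rfl (by decide) (by decide),
      hne "4" '4' rfl (by decide) (by decide), hne "5" '5' rfl (by decide) (by decide),
      hne "6" '6' rfl (by decide) (by decide), hne "7" '7' rfl (by decide) (by decide),
      hne "8" '8' rfl (by decide) (by decide), hne "9" '9' rfl (by decide) (by decide)]
  simp

-- ===== VERDICT (by name: the statement is the Claim_ definition above) =====
theorem persian_numbers_converter_spec : Claim_equal_persian_numbers_converter := by
  intro x _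
  unfold Spec_persian_numbers_converter
  rcases h : x.toList with _ | ⟨c, _ | ⟨d, t⟩⟩
  · -- empty string
    have hx : x = "" := by
      have := congrArg String.ofList h; simpa using this
    subst hx; decide
  · -- single character
    have hx : x = String.ofList [c] := (pv_str_eq_iff x [c]).mpr h
    by_cases hd : 48 ≤ c.toNat ∧ c.toNat ≤ 57
    · subst hx
      have h10 : c.toNat = 48 ∨ c.toNat = 49 ∨ c.toNat = 50 ∨ c.toNat = 51 ∨
          c.toNat = 52 ∨ c.toNat = 53 ∨ c.toNat = 54 ∨ c.toNat = 55 ∨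
          c.toNat = 56 ∨ c.toNat = 57 := by omega
      rcases h10 with h' | h' | h' | h' | h' | h' | h' | h' | h' | h'
      · rw [pv_char_eq_of_toNat c '0' (by rw [h']; rfl)]; decide
      · rw [pv_char_eq_of_toNat c '1' (by rw [h']; rfl)]; decide
      · rw [pv_char_eq_of_toNat c '2' (by rw [h']; rfl)]; decide
      · rw [pv_char_eq_of_toNat c '3' (by rw [h']; rfl)]; decide
      · rw [pv_char_eq_of_toNat c '4' (by rw [h']; rfl)]; decide
      · rw [pv_char_eq_of_toNat c '5' (by rw [h']; rfl)]; decide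
      · rw [pv_char_eq_of_toNat c '6' (by rw [h']; rfl)]; decide
      · rw [pv_char_eq_of_toNat c '7' (by rw [h']; rfl)]; decide
      · rw [pv_char_eq_of_toNat c '8' (by rw [h']; rfl)]; decide
      · rw [pv_char_eq_of_toNat c '9' (by rw [h']; rfl)]; decide
    · -- not a digit: both sides return ""
      have hB : ¬('0' ≤ c ∧ c ≤ '9') := by
        rintro ⟨h1, h2⟩
        exact hd ⟨(pv_le_iff_toNat '0' c).mp h1, (pv_le_iff_toNat c '9').mp h2⟩
      rw [pvA_empty x (by
        intro c' h1 h2 hc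
        rw [h] at hc
        obtain rfl : c = c' := by simpa using hc
        exact hd ⟨h1, h2⟩)]
      simp only [persian_numbers_converter_alt, h]
      rw [if_neg hB]
  · -- two or more characters: both sides return ""
    rw [pvA_empty x (by intro c' _ _ hc; rw [h] at hc; simp at hc)]
    simp only [persian_numbers_converter_alt, h]
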